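-- pv_equiv track=rewrite | github.com/kevinrutledge/rey_and_finns_potion_shop | src/utilities.py | filter_barrels_by_strategy
-- ===== SOURCE A (Python) =====
-- def filter_barrels_by_strategy(barrels: list, strategy: str) -> list:
--     """Filter and sort barrels based on strategy restrictions."""
--     # Filter out MINI barrels first
--     valid_barrels = [b for b in barrels if not b['sku'].startswith('MINI')]
--
--     if strategy == 'PREMIUM':
--         filtered = [b for b in valid_barrels if 'SMALL' in b['sku']]
--     elif strategy == 'PENETRATION':
--         medium = [b for b in valid_barrels if 'MEDIUM' in b['sku']]
--         small = [b for b in valid_barrels if 'SMALL' in b['sku']]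
--         filtered = medium + small
--     else:
--         large = [b for b in valid_barrels if 'LARGE' in b['sku']]
--         medium = [b for b in valid_barrels if 'MEDIUM' in b['sku']]
--         filtered = large + medium
--
--     return filtered
-- ===== SOURCE B (Python) =====
-- def filter_barrels_by_strategy(barrels: list, strategy: str) -> list:
--     """Filter and sort barrels based on strategy restrictions.
--
--     Single pass: bucket each non-MINI barrel into large/medium/small for every
--     keyword its SKU contains, then assemble the result per strategy."""
--     large, medium, small = [], [], []
--     for b in barrels:
--         sku = b['sku']
--         if sku.startswith('MINI'):
--             continue
--         if 'LARGE' in sku: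
--             large.append(b)
--         if 'MEDIUM' in sku:
--             medium.append(b)
--         if 'SMALL' in sku:
--             small.append(b)
--     if strategy == 'PREMIUM':
--         return small
--     if strategy == 'PENETRATION':
--         return medium + small
--     return large + medium
-- ===== Notes on version B (the rewrite author's own statement) =====
-- stated objective: alternative
-- what changed: Replaces the per-strategy list comprehensions (each a separate scan of the barrel list) with a single pass that buckets every non-MINI barrel into large/medium/small via independent membership tests, then assembles the per-strategy result from the buckets.
import Mathlib
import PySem

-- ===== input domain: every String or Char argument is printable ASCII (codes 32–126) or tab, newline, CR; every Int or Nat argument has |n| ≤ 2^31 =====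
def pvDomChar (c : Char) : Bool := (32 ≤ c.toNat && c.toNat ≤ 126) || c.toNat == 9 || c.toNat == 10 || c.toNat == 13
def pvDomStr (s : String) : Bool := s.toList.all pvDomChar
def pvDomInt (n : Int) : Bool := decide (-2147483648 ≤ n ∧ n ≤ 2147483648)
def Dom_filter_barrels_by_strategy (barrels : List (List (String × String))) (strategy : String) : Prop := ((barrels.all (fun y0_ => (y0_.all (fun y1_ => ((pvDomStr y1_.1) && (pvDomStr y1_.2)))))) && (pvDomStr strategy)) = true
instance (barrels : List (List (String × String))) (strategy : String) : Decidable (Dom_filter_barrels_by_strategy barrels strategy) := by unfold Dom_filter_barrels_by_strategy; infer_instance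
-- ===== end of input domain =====

-- B replaces A's per-strategy comprehensions (separate scans) with one bucketing pass; return value only, no mutation.

-- b['sku'] (Pre_ guarantees the key is present, so the default is never consulted)
def pvSku (b : List (String × String)) : String := PySem.Dict.getD (PySem.Dict.mk b) "sku" ""

-- ===== PORT A =====
def filter_barrels_by_strategy (barrels : List (List (String × String))) (strategy : String) : List (List (String × String)) :=
  let valid_barrels := barrels.filter (fun b => !(PySem.Str.startswith (pvSku b) "MINI"))
  if strategy == "PREMIUM" then
    valid_barrels.filter (fun b => PySem.Str.isIn "SMALL" (pvSku b))
  else if strategy == "PENETRATION" then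
    let medium := valid_barrels.filter (fun b => PySem.Str.isIn "MEDIUM" (pvSku b))
    let small := valid_barrels.filter (fun b => PySem.Str.isIn "SMALL" (pvSku b))
    medium ++ small
  else
    let large := valid_barrels.filter (fun b => PySem.Str.isIn "LARGE" (pvSku b))
    let medium := valid_barrels.filter (fun b => PySem.Str.isIn "MEDIUM" (pvSku b))
    large ++ medium

-- ===== PORT B =====
def pvBucketStep (st : List (List (String × String)) × List (List (String × String)) × List (List (String × String)))
    (b : List (String × String)) :
    List (List (String × String)) × List (List (String × String)) × List (List (String × String)) :=
  let sku := pvSku b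
  if PySem.Str.startswith sku "MINI" then st
  else
    ((if PySem.Str.isIn "LARGE" sku then st.1 ++ [b] else st.1),
     (if PySem.Str.isIn "MEDIUM" sku then st.2.1 ++ [b] else st.2.1),
     (if PySem.Str.isIn "SMALL" sku then st.2.2 ++ [b] else st.2.2))

def filter_barrels_by_strategy_alt (barrels : List (List (String × String))) (strategy : String) : List (List (String × String)) :=
  let st := barrels.foldl pvBucketStep ([], [], [])
  if strategy == "PREMIUM" then st.2.2
  else if strategy == "PENETRATION" then st.2.1 ++ st.2.2
  else st.1 ++ st.2.1

-- ===== PRECONDITION & SPEC =====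
-- Pre_ excludes barrels without a 'sku' key, on which the Python A raises KeyError.
def Pre_filter_barrels_by_strategy (barrels : List (List (String × String))) (strategy : String) : Prop :=
  ∀ b ∈ barrels, (PySem.Dict.mk b).contains "sku" = true
instance (barrels : List (List (String × String))) (strategy : String) : Decidable (Pre_filter_barrels_by_strategy barrels strategy) := by unfold Pre_filter_barrels_by_strategy; infer_instance

def pvWitness_filter_barrels_by_strategy : (List (List (String × String))) × String :=
  ([[("sku", "SMALL_RED")], [("sku", "MINI_X")], [("sku", "LARGE_MEDIUM")]], "PENETRATION")

def Spec_filter_barrels_by_strategy (barrels : List (List (String × String))) (strategy : String) (out : List (List (String × String))) : Prop := out = filter_barrels_by_strategy_alt barrels strategy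
instance (barrels : List (List (String × String))) (strategy : String) (out : List (List (String × String))) : Decidable (Spec_filter_barrels_by_strategy barrels strategy out) := by unfold Spec_filter_barrels_by_strategy; infer_instance

-- ===== CLAIM (what is proved, stated in full; the proofs are below) =====
def Claim_equal_filter_barrels_by_strategy : Prop := ∀ (barrels : List (List (String × String))) (strategy : String), Dom_filter_barrels_by_strategy barrels strategy → Pre_filter_barrels_by_strategy barrels strategy → Spec_filter_barrels_by_strategy barrels strategy (filter_barrels_by_strategy barrels strategy)

-- ===== LEMMAS AND PROOFS =====

def pvNonMini (b : List (String × String)) : Bool := !(PySem.Str.startswith (pvSku b) "MINI")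

def pvBucket (kw : String) (bs : List (List (String × String))) : List (List (String × String)) :=
  (bs.filter pvNonMini).filter (fun b => PySem.Str.isIn kw (pvSku b))

theorem pvBucket_cons_not_mini (kw : String) (b : List (String × String))
    (bs : List (List (String × String))) (hm : pvNonMini b = true) :
    pvBucket kw (b :: bs) =
      if PySem.Str.isIn kw (pvSku b) = true then b :: pvBucket kw bs else pvBucket kw bs := by
  by_cases h : PySem.Str.isIn kw (pvSku b) = true <;>
    simp [pvBucket, List.filter_cons, hm]

theorem pvBucket_cons_mini (kw : String) (b : List (String × String))
    (bs : List (List (String × String))) (hm : pvNonMini b = false) :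
    pvBucket kw (b :: bs) = pvBucket kw bs := by
  simp [pvBucket, hm]

theorem foldl_bucketStep (bs : List (List (String × String)))
    (L M S : List (List (String × String))) :
    bs.foldl pvBucketStep (L, M, S) =
      (L ++ pvBucket "LARGE" bs, M ++ pvBucket "MEDIUM" bs, S ++ pvBucket "SMALL" bs) := by
  induction bs generalizing L M S with
  | nil => simp [pvBucket]
  | cons b bs ih =>
    simp only [List.foldl_cons, pvBucketStep]
    by_cases hm : PySem.Str.startswith (pvSku b) "MINI" = true
    · have hnm : pvNonMini b = false := by simp only [pvNonMini, hm, Bool.not_true]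
      rw [if_pos hm, ih]
      simp only [pvBucket_cons_mini _ _ _ hnm]
    · have hm' : PySem.Str.startswith (pvSku b) "MINI" = false := Bool.eq_false_iff.mpr hm
      have hnm : pvNonMini b = true := by simp only [pvNonMini, hm', Bool.not_false]
      rw [if_neg hm, ih]
      refine Prod.ext ?_ (Prod.ext ?_ ?_)
      · rw [pvBucket_cons_not_mini "LARGE" _ _ hnm]
        by_cases h : PySem.Chars.isIn ['L','A','R','G','E'] (pvSku b).toList = true <;> simp [h]
      · rw [pvBucket_cons_not_mini "MEDIUM" _ _ hnm]
        by_cases h : PySem.Chars.isIn ['M','E','D','I','U','M'] (pvSku b).toList = true <;> simp [h]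
      · rw [pvBucket_cons_not_mini "SMALL" _ _ hnm]
        by_cases h : PySem.Chars.isIn ['S','M','A','L','L'] (pvSku b).toList = true <;> simp [h]

theorem filter_barrels_by_strategy_spec : Claim_equal_filter_barrels_by_strategy := by
  intro barrels strategy _ _
  unfold Spec_filter_barrels_by_strategy filter_barrels_by_strategy filter_barrels_by_strategy_alt
  rw [foldl_bucketStep]
  simp only [pvBucket]
  split_ifs <;> rfl
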